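-- pv_equiv track=rewrite | github.com/aldrinc/ghc | mos/backend/app/services/funnel_ai.py | _ordered_intersection_with_fallback
-- ===== SOURCE A (Python) =====
-- def _ordered_intersection_with_fallback(existing_ids: list[str], valid_ids: list[str]) -> list[str]:
--     valid_set = set(valid_ids)
--     ordered: list[str] = []
--     seen: set[str] = set()
--     for value in existing_ids:
--         if value in valid_set and value not in seen:
--             ordered.append(value)
--             seen.add(value)
--     for value in valid_ids:
--         if value not in seen:
--             ordered.append(value)
--             seen.add(value)
--     return ordered
-- ===== SOURCE B (Python) =====
-- def _ordered_intersection_with_fallback(existing_ids: list[str], valid_ids: list[str]) -> list[str]: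
--     uniq = list(dict.fromkeys(valid_ids))
--     n = len(existing_ids)
--     rank = {v: n + i for i, v in enumerate(uniq)}
--     for i, v in enumerate(existing_ids):
--         if v in rank and rank[v] >= n:  # a valid id not yet seen in existing_ids: record its first position
--             rank[v] = i
--     return sorted(uniq, key=rank.get)
-- ===== Notes on version B (the rewrite author's own statement) =====
-- stated objective: alternative
-- what changed: Replaces A's two accumulation loops threading a shared `seen` set with a sort-based algorithm: every unique valid id gets a numeric rank in a precomputed dict (its first position in existing_ids, else len(existing_ids) plus its position among the unique valid ids) and the unique valid ids are sorted by that rank.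
import Mathlib
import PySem

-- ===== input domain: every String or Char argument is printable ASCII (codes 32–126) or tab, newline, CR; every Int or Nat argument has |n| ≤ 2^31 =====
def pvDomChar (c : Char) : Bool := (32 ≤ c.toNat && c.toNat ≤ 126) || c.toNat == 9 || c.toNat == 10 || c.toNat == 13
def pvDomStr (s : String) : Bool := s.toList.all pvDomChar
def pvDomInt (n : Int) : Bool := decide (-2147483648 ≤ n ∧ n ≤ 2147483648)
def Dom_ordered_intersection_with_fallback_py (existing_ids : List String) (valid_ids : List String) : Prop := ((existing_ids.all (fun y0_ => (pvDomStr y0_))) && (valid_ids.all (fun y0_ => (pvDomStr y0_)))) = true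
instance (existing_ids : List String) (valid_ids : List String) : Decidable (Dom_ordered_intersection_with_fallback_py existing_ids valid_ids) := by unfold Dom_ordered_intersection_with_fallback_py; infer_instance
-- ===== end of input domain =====

-- B replaces A's two seen-set accumulation loops with a sort: it assigns every unique
-- valid id a numeric rank (first position in existing_ids, else len(existing_ids) plus
-- its position among the unique valid ids) and sorts by that rank; objective: alternative.
-- ===== PORT A =====
def ordered_intersection_with_fallback_py (existing_ids : List String) (valid_ids : List String) : List String :=
  let valid_set : PySem.Set String := PySem.Set.ofList valid_ids
  let st1 := existing_ids.foldl
    (fun (st : List String × PySem.Set String) value =>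
      if PySem.Set.contains valid_set value && !(PySem.Set.contains st.2 value)
      then (st.1 ++ [value], PySem.Set.add st.2 value) else st)
    ([], PySem.Set.empty)
  let st2 := valid_ids.foldl
    (fun (st : List String × PySem.Set String) value =>
      if !(PySem.Set.contains st.2 value)
      then (st.1 ++ [value], PySem.Set.add st.2 value) else st)
    st1
  st2.1

-- ===== PORT B =====
-- B-side helpers: the rank dict of Source B ({v: n+i for i,v in enumerate(uniq)}, then the
-- first-position update loop over enumerate(existing_ids)).
def pvB_rank0 (uniq : List String) (n : Int) : PySem.Dict String Int :=
  (PySem.List.enumerate uniq).foldl (fun d p => PySem.Dict.insert d p.2 (n + p.1)) PySem.Dict.empty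

-- `rank[v]` is read under the `v in rank` guard, so `getD … 0` is exact here.
def pvB_rank (existing_ids : List String) (d0 : PySem.Dict String Int) (n : Int) : PySem.Dict String Int :=
  (PySem.List.enumerate existing_ids).foldl
    (fun d p =>
      if PySem.Dict.contains d p.2 && decide (n ≤ PySem.Dict.getD d p.2 0)
      then PySem.Dict.insert d p.2 p.1 else d) d0

-- `rank.get` never returns None on a member of uniq, so `getD … 0` is exact as sort key.
def ordered_intersection_with_fallback_py_alt (existing_ids : List String) (valid_ids : List String) : List String :=
  let uniq := PySem.List.dedup valid_ids
  let n : Int := existing_ids.length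
  let rank := pvB_rank existing_ids (pvB_rank0 uniq n) n
  PySem.List.sorted uniq (fun v => PySem.Dict.getD rank v 0)

-- ===== PRECONDITION & SPEC =====
def Spec_ordered_intersection_with_fallback_py (existing_ids : List String) (valid_ids : List String) (out : List String) : Prop := out = ordered_intersection_with_fallback_py_alt existing_ids valid_ids
instance (existing_ids : List String) (valid_ids : List String) (out : List String) : Decidable (Spec_ordered_intersection_with_fallback_py existing_ids valid_ids out) := by unfold Spec_ordered_intersection_with_fallback_py; infer_instance

-- ===== CLAIM (what is proved, stated in full; the proofs are below) =====
def Claim_equal_ordered_intersection_with_fallback_py : Prop := ∀ (existing_ids : List String) (valid_ids : List String), Dom_ordered_intersection_with_fallback_py existing_ids valid_ids → Spec_ordered_intersection_with_fallback_py existing_ids valid_ids (ordered_intersection_with_fallback_py existing_ids valid_ids)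

-- ===== LEMMAS AND PROOFS =====

-- A's second loop keeps `ordered` and `seen` equal (as lists) and acts as repeated Set.add.
theorem pv_loop2_eq (l : List String) (s : PySem.Set String) :
    l.foldl (fun (st : List String × PySem.Set String) value =>
      if !(PySem.Set.contains st.2 value)
      then (st.1 ++ [value], PySem.Set.add st.2 value) else st) (s, s)
    = (l.foldl PySem.Set.add s, l.foldl PySem.Set.add s) := by
  induction l generalizing s with
  | nil => rfl
  | cons x xs ih =>
    simp only [List.foldl_cons]
    by_cases h : x ∈ s
    · have ha : PySem.Set.add s x = s := by simp [PySem.Set.add, h]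
      simp only [ha]
      simpa [h] using ih s
    · have ha : PySem.Set.add s x = s ++ [x] := by simp [PySem.Set.add, h]
      simp only [ha]
      simpa [h] using ih (s ++ [x])

-- A's first loop likewise, with the validity test folded into the step.
theorem pv_loop1_eq (vs : PySem.Set String) (l : List String) (s : PySem.Set String) :
    l.foldl (fun (st : List String × PySem.Set String) value =>
      if PySem.Set.contains vs value && !(PySem.Set.contains st.2 value)
      then (st.1 ++ [value], PySem.Set.add st.2 value) else st) (s, s)
    = (l.foldl (fun t x => if PySem.Set.contains vs x then PySem.Set.add t x else t) s,
       l.foldl (fun t x => if PySem.Set.contains vs x then PySem.Set.add t x else t) s) := by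
  induction l generalizing s with
  | nil => rfl
  | cons x xs ih =>
    simp only [List.foldl_cons]
    by_cases hv : x ∈ vs
    · by_cases h : x ∈ s
      · have ha : PySem.Set.add s x = s := by simp [PySem.Set.add, h]
        simp only [ha]
        simpa [hv, h] using ih s
      · have ha : PySem.Set.add s x = s ++ [x] := by simp [PySem.Set.add, h]
        simp only [ha]
        simpa [hv, h] using ih (s ++ [x])
    · simpa [hv] using ih s

-- first index: idxOf? agrees with idxOf on members
theorem pv_idxOf?_mem {α : Type} [BEq α] [LawfulBEq α] (l : List α) (v : α) (h : v ∈ l) :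
    List.idxOf? v l = some (List.idxOf v l) := by
  induction l with
  | nil => cases h
  | cons x xs ih =>
    by_cases hx : v = x
    · subst hx; simp [List.idxOf?_cons]
    · have hm : v ∈ xs := by
        rcases List.mem_cons.mp h with h1 | h1
        · exact absurd h1 hx
        · exact h1
      simp [List.idxOf?_cons, Ne.symm hx, ih hm]

-- Set.ofList of a snoc is Set.add
theorem pv_ofList_snoc (ys : List String) (x : String) :
    PySem.Set.ofList (ys ++ [x]) = PySem.Set.add (PySem.Set.ofList ys) x := by
  simp [PySem.Set.ofList_eq_foldl, List.foldl_append]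

-- ofList of a filtered list is strictly ordered by first index in the base list
theorem pv_ofList_filter_pairwise (pred : String → Bool) (l : List String) :
    (PySem.Set.ofList (l.filter pred)).Pairwise
      (fun a b => List.idxOf a l < List.idxOf b l) := by
  induction l using List.reverseRecOn with
  | nil => simp [PySem.Set.ofList]
  | append_singleton m x ih =>
    by_cases hp : pred x
    · have hfx : List.filter pred [x] = [x] := by simp [hp]
      rw [List.filter_append, hfx, pv_ofList_snoc]
      by_cases hx : x ∈ PySem.Set.ofList (m.filter pred)
      · have ha : PySem.Set.add (PySem.Set.ofList (m.filter pred)) x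
            = PySem.Set.ofList (m.filter pred) := by simp [PySem.Set.add, hx]
        rw [ha]
        refine ih.imp_of_mem ?_
        intro a b hma hmb hab
        have hma' : a ∈ m := (List.mem_filter.mp ((PySem.Set.mem_ofList _ _).mp hma)).1
        have hmb' : b ∈ m := (List.mem_filter.mp ((PySem.Set.mem_ofList _ _).mp hmb)).1
        rwa [List.idxOf_append_of_mem hma', List.idxOf_append_of_mem hmb']
      · have ha : PySem.Set.add (PySem.Set.ofList (m.filter pred)) x
            = PySem.Set.ofList (m.filter pred) ++ [x] := by simp [PySem.Set.add, hx]
        rw [ha, List.pairwise_append]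
        have hxm : x ∉ m := by
          intro hxm
          exact hx ((PySem.Set.mem_ofList _ _).mpr (List.mem_filter.mpr ⟨hxm, hp⟩))
        refine ⟨?_, by simp, ?_⟩
        · refine ih.imp_of_mem ?_
          intro a b hma hmb hab
          have hma' : a ∈ m := (List.mem_filter.mp ((PySem.Set.mem_ofList _ _).mp hma)).1
          have hmb' : b ∈ m := (List.mem_filter.mp ((PySem.Set.mem_ofList _ _).mp hmb)).1
          rwa [List.idxOf_append_of_mem hma', List.idxOf_append_of_mem hmb']
        · intro a hma b hb
          have hb' : b = x := by simpa using hb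
          subst hb'
          have hma' : a ∈ m := (List.mem_filter.mp ((PySem.Set.mem_ofList _ _).mp hma)).1
          rw [List.idxOf_append_of_mem hma', List.idxOf_append, if_neg hxm]
          have h1 : List.idxOf a m < m.length := List.idxOf_lt_length_iff.mpr hma'
          simp
          omega
    · have hfx : List.filter pred [x] = [] := by simp [hp]
      rw [List.filter_append, hfx, List.append_nil]
      refine ih.imp_of_mem ?_
      intro a b hma hmb hab
      have hma' : a ∈ m := (List.mem_filter.mp ((PySem.Set.mem_ofList _ _).mp hma)).1
      have hmb' : b ∈ m := (List.mem_filter.mp ((PySem.Set.mem_ofList _ _).mp hmb)).1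
      rwa [List.idxOf_append_of_mem hma', List.idxOf_append_of_mem hmb']

-- folding Set.add appends exactly the unseen part of the deduplicated list
theorem pv_foldl_add_eq (l : List String) (s : PySem.Set String) :
    l.foldl PySem.Set.add s
      = s ++ (l.foldl PySem.Set.add []).filter (fun x => !(PySem.Set.contains s x)) := by
  induction l generalizing s with
  | nil => simp
  | cons x xs ih =>
    simp only [List.foldl_cons]
    by_cases h : x ∈ s
    · have ha : PySem.Set.add s x = s := by simp [PySem.Set.add, h]
      have hb : PySem.Set.add ([] : PySem.Set String) x = [x] := by simp [PySem.Set.add]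
      rw [ha, hb, ih s, ih [x]]
      rw [List.filter_append, List.filter_filter]
      have h1 : List.filter (fun x_1 => !PySem.Set.contains s x_1) [x] = [] := by
        simp [h]
      rw [h1, List.nil_append]
      congr 1
      apply List.filter_congr
      intro a _
      by_cases hax : a = x
      · subst hax; simp [h]
      · simp [PySem.Set.contains, hax]
    · have ha : PySem.Set.add s x = s ++ [x] := by simp [PySem.Set.add, h]
      have hb : PySem.Set.add ([] : PySem.Set String) x = [x] := by simp [PySem.Set.add]
      rw [ha, hb, ih (s ++ [x]), ih [x]]
      rw [List.filter_append, List.filter_filter, List.append_assoc]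
      have h1 : List.filter (fun x_1 => !PySem.Set.contains s x_1) [x] = [x] := by
        simp [h]
      rw [h1]
      congr 2
      apply List.filter_congr
      intro a _
      by_cases hax : a = x
      · subst hax; simp
      · simp [PySem.Set.contains, hax, Bool.and_comm]

-- ofList of a list with no duplicates is that list
theorem pv_foldl_add_nodup (l : List String) (s : PySem.Set String)
    (h : (s ++ l).Nodup) : l.foldl PySem.Set.add s = s ++ l := by
  induction l generalizing s with
  | nil => simp
  | cons x xs ih =>
    have hx : x ∉ s := by
      intro hx
      exact (List.disjoint_of_nodup_append h hx) List.mem_cons_self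
    have ha : PySem.Set.add s x = s ++ [x] := by simp [PySem.Set.add, hx]
    simp only [List.foldl_cons, ha]
    have := ih (s ++ [x]) (by simpa using h)
    simpa using this


-- index? agrees with idxOf on members
theorem pv_index?_mem (l : List String) (v : String) (h : v ∈ l) :
    PySem.List.index? l v = some (List.idxOf v l) := pv_idxOf?_mem l v h

-- the deduplicated head block plus the unseen rest is a permutation of the deduplicated list
theorem pv_perm_gen (E U : List String) (hndE : E.Nodup) (hndU : U.Nodup)
    (hsub : ∀ a ∈ E, a ∈ U) :
    (E ++ U.filter (fun x => !(PySem.Set.contains E x))).Perm U := by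
  have h2 : (U.filter (fun x => PySem.Set.contains E x)).Perm E := by
    refine (List.perm_ext_iff_of_nodup (hndU.filter _) hndE).mpr ?_
    intro a
    constructor
    · intro ha
      have := List.mem_filter.mp ha
      simpa [PySem.Set.contains] using this.2
    · intro ha
      exact List.mem_filter.mpr ⟨hsub a ha, by simpa [PySem.Set.contains] using ha⟩
  exact ((h2.symm).append_right _).trans (List.filter_append_perm _ U)

-- the combined list is strictly increasing under B's rank key
theorem pv_pair (existing_ids valid_ids : List String) :
    (PySem.Set.ofList (List.filter (fun v => PySem.Set.contains (PySem.Set.ofList valid_ids) v) existing_ids) ++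
      List.filter (fun x => !PySem.Set.contains (PySem.Set.ofList (List.filter (fun v => PySem.Set.contains (PySem.Set.ofList valid_ids) v) existing_ids)) x) (PySem.Set.ofList valid_ids)).Pairwise
      (fun a b =>
        (if existing_ids.contains a then (((PySem.List.index? existing_ids a).getD 0 : Nat) : Int)
         else (existing_ids.length : Int) + (((PySem.List.index? (PySem.Set.ofList valid_ids) a).getD 0 : Nat) : Int))
        <
        (if existing_ids.contains b then (((PySem.List.index? existing_ids b).getD 0 : Nat) : Int)
         else (existing_ids.length : Int) + (((PySem.List.index? (PySem.Set.ofList valid_ids) b).getD 0 : Nat) : Int))) := by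
  have hEmem : ∀ a : String,
      a ∈ PySem.Set.ofList (List.filter (fun v => PySem.Set.contains (PySem.Set.ofList valid_ids) v) existing_ids)
      ↔ a ∈ existing_ids ∧ a ∈ PySem.Set.ofList valid_ids := by
    intro a
    rw [PySem.Set.mem_ofList, List.mem_filter]
    simp [PySem.Set.contains]
  have hpe := pv_ofList_filter_pairwise (fun v => PySem.Set.contains (PySem.Set.ofList valid_ids) v) existing_ids
  have hUpair : (PySem.Set.ofList valid_ids).Pairwise
      (fun a b => List.idxOf a (PySem.Set.ofList valid_ids) < List.idxOf b (PySem.Set.ofList valid_ids)) := by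
    have h := pv_ofList_filter_pairwise (fun _ => true) (PySem.Set.ofList valid_ids)
    have hof : PySem.Set.ofList (List.filter (fun _ => true) (PySem.Set.ofList valid_ids))
        = PySem.Set.ofList valid_ids := by
      rw [List.filter_true, PySem.Set.ofList_eq_foldl]
      simpa using pv_foldl_add_nodup (PySem.Set.ofList valid_ids) [] (by simp [PySem.Set.nodup_ofList valid_ids])
    rwa [hof] at h
  rw [List.pairwise_append]
  refine ⟨?_, ?_, ?_⟩
  · refine hpe.imp_of_mem ?_
    intro a b ha hb hab
    have ha' : a ∈ existing_ids := ((hEmem a).mp ha).1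
    have hb' : b ∈ existing_ids := ((hEmem b).mp hb).1
    rw [if_pos (by simpa using ha'), if_pos (by simpa using hb'),
        pv_index?_mem existing_ids a ha', pv_index?_mem existing_ids b hb']
    simpa using hab
  · refine (hUpair.filter _).imp_of_mem ?_
    intro a b ha hb hab
    have haf := List.mem_filter.mp ha
    have hbf := List.mem_filter.mp hb
    have hax : a ∉ existing_ids := by
      intro hx
      have : a ∈ PySem.Set.ofList (List.filter (fun v => PySem.Set.contains (PySem.Set.ofList valid_ids) v) existing_ids) :=
        (hEmem a).mpr ⟨hx, haf.1⟩
      have hc : List.contains (PySem.Set.ofList (List.filter (fun v => PySem.Set.contains (PySem.Set.ofList valid_ids) v) existing_ids)) a = true := List.contains_iff_mem.mpr this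
      have hc' := haf.2
      simp only [PySem.Set.contains] at hc
      simp only [Bool.not_eq_true', PySem.Set.contains] at hc'
      rw [hc] at hc'
      cases hc'
    have hbx : b ∉ existing_ids := by
      intro hx
      have : b ∈ PySem.Set.ofList (List.filter (fun v => PySem.Set.contains (PySem.Set.ofList valid_ids) v) existing_ids) :=
        (hEmem b).mpr ⟨hx, hbf.1⟩
      have hc : List.contains (PySem.Set.ofList (List.filter (fun v => PySem.Set.contains (PySem.Set.ofList valid_ids) v) existing_ids)) b = true := List.contains_iff_mem.mpr this
      have hc' := hbf.2
      simp only [PySem.Set.contains] at hc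
      simp only [Bool.not_eq_true', PySem.Set.contains] at hc'
      rw [hc] at hc'
      cases hc'
    rw [if_neg (by simpa using hax), if_neg (by simpa using hbx),
        pv_index?_mem _ a haf.1, pv_index?_mem _ b hbf.1]
    simp only [Option.getD_some]
    have hab' : ((List.idxOf a (PySem.Set.ofList valid_ids) : Nat) : Int) < ((List.idxOf b (PySem.Set.ofList valid_ids) : Nat) : Int) := by exact_mod_cast hab
    omega
  · intro a ha b hb
    have ha' : a ∈ existing_ids := ((hEmem a).mp ha).1
    have hbf := List.mem_filter.mp hb
    have hbx : b ∉ existing_ids := by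
      intro hx
      have : b ∈ PySem.Set.ofList (List.filter (fun v => PySem.Set.contains (PySem.Set.ofList valid_ids) v) existing_ids) :=
        (hEmem b).mpr ⟨hx, hbf.1⟩
      have hc : List.contains (PySem.Set.ofList (List.filter (fun v => PySem.Set.contains (PySem.Set.ofList valid_ids) v) existing_ids)) b = true := List.contains_iff_mem.mpr this
      have hc' := hbf.2
      simp only [PySem.Set.contains] at hc
      simp only [Bool.not_eq_true', PySem.Set.contains] at hc'
      rw [hc] at hc'
      cases hc'
    rw [if_pos (by simpa using ha'), if_neg (by simpa using hbx),
        pv_index?_mem existing_ids a ha', pv_index?_mem _ b hbf.1]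
    simp only [Option.getD_some]
    have h1 : List.idxOf a existing_ids < existing_ids.length := List.idxOf_lt_length_iff.mpr ha'
    omega

-- the dict comprehension: get? of the enumerate/insert fold on a duplicate-free list
theorem pv_rank0_get? (l : List String) (hnd : l.Nodup) :
    ∀ (s : Int) (d : PySem.Dict String Int) (n : Int) (v : String),
    ((PySem.List.enumerate l s).foldl (fun d p => PySem.Dict.insert d p.2 (n + p.1)) d).get? v
      = if v ∈ l then some (n + (s + (List.idxOf v l : Int))) else d.get? v := by
  induction l with
  | nil => intro s d n v; simp [PySem.List.enumerate_nil]
  | cons x xs ih =>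
    intro s d n v
    rw [PySem.List.enumerate_cons]
    simp only [List.foldl_cons]
    have hx : x ∉ xs := (List.nodup_cons.mp hnd).1
    rw [ih (List.nodup_cons.mp hnd).2 (s + 1) (PySem.Dict.insert d x (n + s)) n v]
    by_cases hvx : v = x
    · subst hvx
      rw [if_neg hx, if_pos List.mem_cons_self, PySem.Dict.get?_insert_self]
      simp
    · by_cases hvm : v ∈ xs
      · rw [if_pos hvm, if_pos (List.mem_cons_of_mem x hvm)]
        simp only [Option.some.injEq, List.idxOf_cons, beq_eq_false_iff_ne.mpr (Ne.symm hvx), cond_false]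
        push_cast
        ring
      · have : v ∉ x :: xs := by
          intro hc
          rcases List.mem_cons.mp hc with h | h
          · exact hvx h
          · exact hvm h
        rw [if_neg hvm, if_neg this, PySem.Dict.get?_insert_of_ne _ _ hvx]

-- the first-position update loop: get? after folding the guarded insert over enumerate
theorem pv_rank_loop_get? (l : List String) :
    ∀ (s : Int) (d : PySem.Dict String Int) (n : Int), 0 ≤ s → s + l.length ≤ n → ∀ v,
    ((PySem.List.enumerate l s).foldl
        (fun d p =>
          if PySem.Dict.contains d p.2 && decide (n ≤ PySem.Dict.getD d p.2 0)
          then PySem.Dict.insert d p.2 p.1 else d) d).get? v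
      = match d.get? v with
        | none => none
        | some r =>
          if n ≤ r then (if v ∈ l then some (s + (List.idxOf v l : Int)) else some r) else some r := by
  induction l with
  | nil =>
    intro s d n _ _ v
    rw [PySem.List.enumerate_nil]
    cases hv : d.get? v with
    | none => simp [hv]
    | some r => simp [hv]
  | cons x xs ih =>
    intro s d n hs hn v
    rw [PySem.List.enumerate_cons]
    simp only [List.foldl_cons]
    have hsn : ¬ n ≤ s := by
      have : (0:Int) ≤ (xs.length : Int) := by positivity
      simp only [List.length_cons] at hn
      push_cast at hn
      omega
    cases hx : d.get? x with
    | none =>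
      have hcx : d.contains x = false := by
        rw [PySem.Dict.contains_eq_isSome_get?, hx]; rfl
      rw [if_neg (by simp [hcx])]
      rw [ih (s + 1) d n (by omega) (by simp only [List.length_cons] at hn; push_cast at hn ⊢; omega) v]
      by_cases hvx : v = x
      · subst hvx; rw [hx]
      · cases hv : d.get? v with
        | none => rfl
        | some r =>
          simp only []
          by_cases hr : n ≤ r
          · rw [if_pos hr, if_pos hr]
            by_cases hvm : v ∈ xs
            · rw [if_pos hvm, if_pos (List.mem_cons_of_mem x hvm)]
              simp only [Option.some.injEq, List.idxOf_cons, beq_eq_false_iff_ne.mpr (Ne.symm hvx), cond_false]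
              push_cast; ring
            · rw [if_neg hvm, if_neg (by
                intro hc
                rcases List.mem_cons.mp hc with h | h
                · exact hvx h
                · exact hvm h)]
          · rw [if_neg hr, if_neg hr]
    | some r =>
      have hcx : d.contains x = true := by
        rw [PySem.Dict.contains_eq_isSome_get?, hx]; rfl
      have hgx : d.getD x 0 = r := PySem.Dict.getD_of_get?_eq_some _ 0 hx
      by_cases hr : n ≤ r
      · rw [if_pos (by simp [hcx, hgx, hr])]
        rw [ih (s + 1) (d.insert x s) n (by omega) (by simp only [List.length_cons] at hn; push_cast at hn ⊢; omega) v]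
        by_cases hvx : v = x
        · subst hvx
          rw [PySem.Dict.get?_insert_self, hx]
          simp only [if_neg hsn, if_pos hr, if_pos List.mem_cons_self]
          simp
        · rw [PySem.Dict.get?_insert_of_ne _ _ hvx]
          cases hv : d.get? v with
          | none => rfl
          | some r' =>
            simp only []
            by_cases hr' : n ≤ r'
            · rw [if_pos hr', if_pos hr']
              by_cases hvm : v ∈ xs
              · rw [if_pos hvm, if_pos (List.mem_cons_of_mem x hvm)]
                simp only [Option.some.injEq, List.idxOf_cons, beq_eq_false_iff_ne.mpr (Ne.symm hvx), cond_false]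
                push_cast; ring
              · rw [if_neg hvm, if_neg (by
                  intro hc
                  rcases List.mem_cons.mp hc with h | h
                  · exact hvx h
                  · exact hvm h)]
            · rw [if_neg hr', if_neg hr']
      · rw [if_neg (by simp [hcx, hgx, hr])]
        rw [ih (s + 1) d n (by omega) (by simp only [List.length_cons] at hn; push_cast at hn ⊢; omega) v]
        by_cases hvx : v = x
        · subst hvx
          rw [hx]
          simp only [if_neg hr]
        · cases hv : d.get? v with
          | none => rfl
          | some r' =>
            simp only []
            by_cases hr' : n ≤ r'
            · rw [if_pos hr', if_pos hr']
              by_cases hvm : v ∈ xs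
              · rw [if_pos hvm, if_pos (List.mem_cons_of_mem x hvm)]
                simp only [Option.some.injEq, List.idxOf_cons, beq_eq_false_iff_ne.mpr (Ne.symm hvx), cond_false]
                push_cast; ring
              · rw [if_neg hvm, if_neg (by
                  intro hc
                  rcases List.mem_cons.mp hc with h | h
                  · exact hvx h
                  · exact hvm h)]
            · rw [if_neg hr', if_neg hr']

-- on members of uniq, B's dict rank equals the plain first-position rank
theorem pv_rank_getD (existing_ids valid_ids : List String) (v : String)
    (hv : v ∈ PySem.Set.ofList valid_ids) :
    PySem.Dict.getD
        (pvB_rank existing_ids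
          (pvB_rank0 (PySem.Set.ofList valid_ids) (existing_ids.length : Int))
          (existing_ids.length : Int)) v 0
      = (if existing_ids.contains v then (((PySem.List.index? existing_ids v).getD 0 : Nat) : Int)
         else (existing_ids.length : Int) + (((PySem.List.index? (PySem.Set.ofList valid_ids) v).getD 0 : Nat) : Int)) := by
  unfold pvB_rank pvB_rank0
  rw [PySem.Dict.getD_eq_get?_getD]
  rw [pv_rank_loop_get? existing_ids 0 _ _ (le_refl 0) (by simp) v]
  rw [pv_rank0_get? (PySem.Set.ofList valid_ids) (PySem.Set.nodup_ofList valid_ids) 0 PySem.Dict.empty _ v]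
  rw [if_pos hv]
  have hidx : (0:Int) ≤ (List.idxOf v (PySem.Set.ofList valid_ids) : Int) := by positivity
  simp only []
  rw [if_pos (by omega : (existing_ids.length : Int) ≤ (existing_ids.length : Int) + (0 + (List.idxOf v (PySem.Set.ofList valid_ids) : Int)))]
  by_cases hm : v ∈ existing_ids
  · rw [if_pos hm, if_pos (by simpa using hm), pv_index?_mem existing_ids v hm]
    simp
  · rw [if_neg hm, if_neg (by simpa using hm), pv_index?_mem _ v hv]
    simp only [Option.getD_some]
    ring

-- the combined list is strictly increasing under B's dict rank key
theorem pv_pair_dict (existing_ids valid_ids : List String) :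
    (PySem.Set.ofList (List.filter (fun v => PySem.Set.contains (PySem.Set.ofList valid_ids) v) existing_ids) ++
      List.filter (fun x => !PySem.Set.contains (PySem.Set.ofList (List.filter (fun v => PySem.Set.contains (PySem.Set.ofList valid_ids) v) existing_ids)) x) (PySem.Set.ofList valid_ids)).Pairwise
      (fun a b =>
        PySem.Dict.getD
            (pvB_rank existing_ids
              (pvB_rank0 (PySem.Set.ofList valid_ids) (existing_ids.length : Int))
              (existing_ids.length : Int)) a 0
        < PySem.Dict.getD
            (pvB_rank existing_ids
              (pvB_rank0 (PySem.Set.ofList valid_ids) (existing_ids.length : Int))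
              (existing_ids.length : Int)) b 0) := by
  have hsub : ∀ a, a ∈ (PySem.Set.ofList (List.filter (fun v => PySem.Set.contains (PySem.Set.ofList valid_ids) v) existing_ids) ++
      List.filter (fun x => !PySem.Set.contains (PySem.Set.ofList (List.filter (fun v => PySem.Set.contains (PySem.Set.ofList valid_ids) v) existing_ids)) x) (PySem.Set.ofList valid_ids)) →
      a ∈ PySem.Set.ofList valid_ids := by
    intro a ha
    rcases List.mem_append.mp ha with h | h
    · have := (PySem.Set.mem_ofList _ _).mp h
      have h2 := (List.mem_filter.mp this).2
      rw [PySem.Set.mem_ofList]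
      simpa [PySem.Set.contains] using h2
    · exact (List.mem_filter.mp h).1
  refine (pv_pair existing_ids valid_ids).imp_of_mem ?_
  intro a b ha hb hab
  rw [pv_rank_getD existing_ids valid_ids a (hsub a ha),
      pv_rank_getD existing_ids valid_ids b (hsub b hb)]
  exact hab

-- ===== VERDICT (by name: the statement is the Claim_ definition above) =====
theorem ordered_intersection_with_fallback_py_spec : Claim_equal_ordered_intersection_with_fallback_py := by
  intro existing_ids valid_ids _
  unfold Spec_ordered_intersection_with_fallback_py
  unfold ordered_intersection_with_fallback_py ordered_intersection_with_fallback_py_alt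
  simp only []
  rw [show (([], PySem.Set.empty) : List String × PySem.Set String)
        = ((PySem.Set.empty : PySem.Set String), (PySem.Set.empty : PySem.Set String)) from rfl]
  rw [pv_loop1_eq, pv_loop2_eq]
  rw [show (PySem.Set.empty : PySem.Set String) = ([] : PySem.Set String) from rfl]
  rw [← List.foldl_filter, pv_foldl_add_eq, ← PySem.Set.ofList_eq_foldl, ← PySem.Set.ofList_eq_foldl,
      PySem.List.dedup_eq_ofList]
  exact (PySem.List.sorted_eq_of_perm_of_pairwise_lt _ _ _
    (pv_perm_gen _ _ (PySem.Set.nodup_ofList _) (PySem.Set.nodup_ofList _)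
      (fun a ha => by
        have := (PySem.Set.mem_ofList _ _).mp ha
        have h2 := (List.mem_filter.mp this).2
        simpa [PySem.Set.contains] using h2))
    (pv_pair_dict existing_ids valid_ids)).symm
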